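-- pv_equiv track=rewrite | github.com/cristianobattistini/multimodal-bt-generation | behavior_integration/camera/action_frame_capture.py | _sanitize_name
-- ===== SOURCE A (Python) =====
-- def _sanitize_name(name: str) -> str:
--     """
--     Sanitize object name for use in folder/file names.
--
--     Args:
--         name: Original object name
--
--     Returns:
--         Sanitized name safe for filesystem
--     """
--     if not name:
--         return "unknown"
--
--     # Replace problematic characters
--     sanitized = name.replace('.', '_').replace(' ', '_').replace('/', '_')
--     sanitized = sanitized.replace(':', '_').replace('\\', '_')
--
--     # Remove consecutive underscores
--     while '__' in sanitized:
--         sanitized = sanitized.replace('__', '_')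
--
--     # Truncate if too long
--     return sanitized[:40].strip('_')
-- ===== SOURCE B (Python) =====
-- def _sanitize_name(name: str) -> str:
--     """Single forward pass: translate problematic characters to underscores and
--     collapse underscore runs on the fly, then truncate to 40 and strip the ends."""
--     if not name:
--         return "unknown"
--     out = []
--     for ch in name:
--         c = '_' if ch in '. /:\\' else ch
--         if c == '_' and out and out[-1] == '_':
--             continue
--         out.append(c)
--     return ''.join(out)[:40].strip('_')
-- ===== Notes on version B (the rewrite author's own statement) =====
-- stated objective: alternative
-- what changed: Replaces A's five-pass replace chain plus a repeated double-underscore replacement fixpoint loop with a single forward pass that translates each bad character to an underscore and collapses consecutive underscores on the fly.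
import Mathlib
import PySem

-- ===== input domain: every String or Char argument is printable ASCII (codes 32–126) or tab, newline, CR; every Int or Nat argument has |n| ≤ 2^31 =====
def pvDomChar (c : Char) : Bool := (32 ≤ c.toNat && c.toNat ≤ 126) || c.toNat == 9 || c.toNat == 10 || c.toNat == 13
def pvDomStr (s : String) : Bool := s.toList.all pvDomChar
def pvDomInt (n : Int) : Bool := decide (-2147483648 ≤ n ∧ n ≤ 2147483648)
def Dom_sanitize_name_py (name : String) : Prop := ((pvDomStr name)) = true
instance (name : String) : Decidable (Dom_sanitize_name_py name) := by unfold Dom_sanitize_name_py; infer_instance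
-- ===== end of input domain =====

-- B replaces A's five-pass replace chain plus a repeated double-underscore replacement
-- loop by one forward pass that translates and collapses on the fly (same return value).

-- ===== PORT A =====
-- one step of A's inner replace call (leftmost, non-overlapping); used only to
-- justify termination of the while-loop port below (cited in decreasing_by)
def pvRepDD : List Char → List Char
  | [] => []
  | [c] => [c]
  | a :: b :: t => if a = '_' ∧ b = '_' then '_' :: pvRepDD t else a :: pvRepDD (b :: t)

theorem pvReplaceGoDD (fuel : Nat) (l acc : List Char) (h : l.length ≤ fuel) :
    PySem.Chars.replace.go ['_', '_'] ['_'] fuel l acc = acc.reverse ++ pvRepDD l := by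
  induction fuel generalizing l acc with
  | zero =>
    have hl : l = [] := List.eq_nil_of_length_eq_zero (Nat.le_zero.mp h)
    subst hl; simp [PySem.Chars.replace.go, pvRepDD]
  | succ f ih =>
    match l with
    | [] => simp [PySem.Chars.replace.go, pvRepDD]
    | a :: t =>
      rw [PySem.Chars.replace.go]
      by_cases hp : List.isPrefixOf ['_', '_'] (a :: t) = true
      · obtain ⟨ha, t', ht⟩ : a = '_' ∧ ∃ t', t = '_' :: t' := by
          match t with
          | [] => simp [List.isPrefixOf] at hp
          | b :: t' =>
            simp [List.isPrefixOf] at hp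
            exact ⟨hp.1.symm, t', by rw [← hp.2]⟩
        subst ha ht
        simp only [hp, if_true]
        have hlen : t'.length ≤ f := by simp at h; omega
        simp only [List.length_cons, List.length_nil, List.drop_succ_cons, List.drop_zero,
          List.reverse_cons, List.reverse_nil, List.nil_append]
        rw [ih _ _ hlen]
        simp [pvRepDD]
      · simp only [hp, Bool.false_eq_true, if_false]
        have hlen : t.length ≤ f := by simp at h; omega
        rw [ih _ _ hlen]
        have hr : pvRepDD (a :: t) = a :: pvRepDD t := by
          match t with
          | [] => rfl
          | b :: t' =>
            have : ¬(a = '_' ∧ b = '_') := by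
              intro ⟨h1, h2⟩; subst h1 h2; simp [List.isPrefixOf] at hp
            simp [pvRepDD, this]
        rw [hr]; simp

theorem pvRepDD_eq (l : List Char) :
    PySem.Chars.replace l ['_', '_'] ['_'] = pvRepDD l := by
  rw [PySem.Chars.replace]
  simp only [List.isEmpty]
  exact pvReplaceGoDD l.length l [] le_rfl

theorem pvRepDD_length_le (l : List Char) : (pvRepDD l).length ≤ l.length := by
  induction l using pvRepDD.induct with
  | case1 => simp [pvRepDD]
  | case2 c => simp [pvRepDD]
  | case3 a b t hab ih => simp only [pvRepDD, if_pos hab, List.length_cons] at *; omega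
  | case4 a b t hab ih => simp only [pvRepDD, if_neg hab, List.length_cons] at *; omega

theorem pvRepDD_length_lt (l : List Char) (h : ['_', '_'] <:+: l) :
    (pvRepDD l).length < l.length := by
  induction l using pvRepDD.induct with
  | case1 => exact absurd (List.eq_nil_of_infix_nil h) (by simp)
  | case2 c => have := h.length_le; simp at this
  | case3 a b t hab ih =>
    simp only [pvRepDD, if_pos hab, List.length_cons]
    have := pvRepDD_length_le t
    omega
  | case4 a b t hab ih =>
    simp only [pvRepDD, if_neg hab, List.length_cons]
    have hbt : ['_', '_'] <:+: b :: t := by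
      rcases List.infix_cons_iff.mp h with hpre | hinf
      · rcases hpre with ⟨u, hu⟩
        injection hu with h1 h2
        exact absurd ⟨h1.symm, by
          cases t with
          | nil => injection h2 with h2a _; exact h2a.symm
          | cons x xs => injection h2 with h2a _; exact h2a.symm⟩ hab
      · exact hinf
    have := ih hbt
    simp only [List.length_cons] at this
    omega

def pyCollapseWhile (s : String) : String :=
  if PySem.Str.isIn "__" s then pyCollapseWhile (PySem.Str.replace s "__" "_") else s
termination_by s.toList.length
decreasing_by
  have h := (PySem.Str.isIn_iff_infix "__" s).mp ‹_›
  rw [PySem.Str.toList_replace]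
  have hdd : ("__" : String).toList = ['_', '_'] := by decide
  have hd1 : ("_" : String).toList = ['_'] := by decide
  rw [hdd, hd1, pvRepDD_eq]
  exact pvRepDD_length_lt _ (hdd ▸ h)

def sanitize_name_py (name : String) : String :=
  if name = "" then "unknown"
  else
    let s1 := PySem.Str.replace (PySem.Str.replace (PySem.Str.replace name "." "_") " " "_") "/" "_"
    let s2 := PySem.Str.replace (PySem.Str.replace s1 ":" "_") "\\" "_"
    let s3 := pyCollapseWhile s2
    PySem.Str.stripChars (PySem.Str.slice s3 none (some 40)) "_"

-- ===== PORT B =====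
-- 'c = "_" if ch in ". /:\\" else ch; skip "_" after "_"; else append'
def bStep (out : List Char) (ch : Char) : List Char :=
  let c := if ['.', ' ', '/', ':', '\\'].contains ch then '_' else ch
  if c = '_' ∧ out ≠ [] ∧ out.getLast? = some '_' then out else out ++ [c]

def sanitize_name_py_alt (name : String) : String :=
  if name = "" then "unknown"
  else
    let out := name.toList.foldl bStep []
    PySem.Str.stripChars (PySem.Str.slice (String.ofList out) none (some 40)) "_"

-- ===== PRECONDITION & SPEC =====
def Spec_sanitize_name_py (name : String) (out : String) : Prop := out = sanitize_name_py_alt name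
instance (name : String) (out : String) : Decidable (Spec_sanitize_name_py name out) := by unfold Spec_sanitize_name_py; infer_instance

-- ===== CLAIM (what is proved, stated in full; the proofs are below) =====
def Claim_equal_sanitize_name_py : Prop := ∀ (name : String), Dom_sanitize_name_py name → Spec_sanitize_name_py name (sanitize_name_py name)

-- ===== LEMMAS AND PROOFS =====

-- translate one character (the composite of A's five replaces / B's membership test)
def pvTr (x : Char) : Char := if ['.', ' ', '/', ':', '\\'].contains x then '_' else x

-- collapse runs of '_' given the previously emitted character
def pvCol (p : Option Char) : List Char → List Char
  | [] => []
  | a :: t => if a = '_' ∧ p = some '_' then pvCol p t else a :: pvCol (some a) t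

theorem pvReplaceGoOne (c : Char) (fuel : Nat) (l acc : List Char) (h : l.length ≤ fuel) :
    PySem.Chars.replace.go [c] ['_'] fuel l acc
      = acc.reverse ++ l.map (fun x => if x = c then '_' else x) := by
  induction fuel generalizing l acc with
  | zero =>
    have hl : l = [] := List.eq_nil_of_length_eq_zero (Nat.le_zero.mp h)
    subst hl; simp [PySem.Chars.replace.go]
  | succ f ih =>
    match l with
    | [] => simp [PySem.Chars.replace.go]
    | a :: t =>
      rw [PySem.Chars.replace.go]
      have hlen : t.length ≤ f := by simp at h; omega
      by_cases hp : List.isPrefixOf [c] (a :: t) = true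
      · have hac : a = c := by simp [List.isPrefixOf] at hp; exact hp.symm
        subst hac
        simp only [hp, if_true]
        simp only [List.length_cons, List.length_nil, List.drop_succ_cons, List.drop_zero,
          List.reverse_cons, List.reverse_nil, List.nil_append]
        rw [ih _ _ hlen]
        simp
      · have hac : a ≠ c := by
          intro hEq; subst hEq; simp [List.isPrefixOf] at hp
        simp only [hp, Bool.false_eq_true, if_false]
        rw [ih _ _ hlen]
        simp [hac]

theorem pvReplaceOne (c : Char) (l : List Char) :
    PySem.Chars.replace l [c] ['_'] = l.map (fun x => if x = c then '_' else x) := by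
  rw [PySem.Chars.replace]
  simp only [List.isEmpty]
  exact pvReplaceGoOne c l.length l [] le_rfl

-- the five single-character replaces compose to the single map pvTr
theorem pvChainEqMap (name : String) :
    (PySem.Str.replace (PySem.Str.replace (PySem.Str.replace (PySem.Str.replace
        (PySem.Str.replace name "." "_") " " "_") "/" "_") ":" "_") "\\" "_").toList
      = name.toList.map pvTr := by
  simp only [PySem.Str.toList_replace]
  have h1 : ("." : String).toList = ['.'] := by decide
  have h2 : (" " : String).toList = [' '] := by decide
  have h3 : ("/" : String).toList = ['/'] := by decide
  have h4 : (":" : String).toList = [':'] := by decide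
  have h5 : ("\\" : String).toList = ['\\'] := by decide
  have hu : ("_" : String).toList = ['_'] := by decide
  rw [h1, h2, h3, h4, h5, hu, pvReplaceOne, pvReplaceOne, pvReplaceOne, pvReplaceOne,
    pvReplaceOne]
  simp only [List.map_map]
  apply List.map_congr_left
  intro x _
  simp only [Function.comp, pvTr, List.contains_cons, List.contains_nil]
  by_cases e1 : x = '.' <;> by_cases e2 : x = ' ' <;> by_cases e3 : x = '/' <;>
    by_cases e4 : x = ':' <;> by_cases e5 : x = '\\' <;>
    simp_all

-- one replacement pass does not change the collapsed form
theorem pvCol_repDD (l : List Char) : ∀ p, pvCol p (pvRepDD l) = pvCol p l := by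
  induction l using pvRepDD.induct with
  | case1 => intro p; rfl
  | case2 c => intro p; rfl
  | case3 a b t hab ih =>
    obtain ⟨ha, hb⟩ := hab; subst ha hb
    intro p
    rw [show pvRepDD ('_' :: '_' :: t) = '_' :: pvRepDD t from by simp [pvRepDD]]
    by_cases hp : p = some '_'
    · simp [pvCol, hp, ih]
    · simp [pvCol, hp, ih]
  | case4 a b t hab ih =>
    intro p
    simp only [pvRepDD, if_neg hab]
    by_cases hc : a = '_' ∧ p = some '_'
    · simp [pvCol, hc, ih]
    · simp [pvCol, hc, ih]

-- once no '__' occurs, collapsing is the identity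
theorem pvCol_eq_self (l : List Char) (h : ¬ ['_', '_'] <:+: l) :
    ∀ p, (p = some '_' → l.head? ≠ some '_') → pvCol p l = l := by
  induction l with
  | nil => intro p _; rfl
  | cons a t ih =>
    intro p hp
    have hcond : ¬ (a = '_' ∧ p = some '_') := by
      intro ⟨h1, h2⟩
      exact hp h2 (by simp [h1])
    have ht : ¬ ['_', '_'] <:+: t := fun hinf => h (List.infix_cons_iff.mpr (Or.inr hinf))
    have hstep : some a = some '_' → t.head? ≠ some '_' := by
      intro ha hh
      cases t with
      | nil => simp at hh
      | cons b t' =>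
        injection ha with ha; injection hh with hh
        exact h ⟨[], t', by simp [ha, hh]⟩
    simp only [pvCol, if_neg hcond]
    rw [ih ht (some a) hstep]

-- the while loop computes exactly the collapsed form
theorem pvWhile_eq_col (s : String) : (pyCollapseWhile s).toList = pvCol none s.toList := by
  induction s using pyCollapseWhile.induct with
  | case1 s hin ih =>
    rw [pyCollapseWhile, if_pos hin, ih, PySem.Str.toList_replace]
    have hdd : ("__" : String).toList = ['_', '_'] := by decide
    have hd1 : ("_" : String).toList = ['_'] := by decide
    rw [hdd, hd1, pvRepDD_eq, pvCol_repDD]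
  | case2 s hin =>
    rw [pyCollapseWhile, if_neg hin]
    have h : ¬ ['_', '_'] <:+: s.toList := by
      intro hinf
      exact hin ((PySem.Str.isIn_iff_infix "__" s).mpr (by
        have hdd : ("__" : String).toList = ['_', '_'] := by decide
        rw [hdd]; exact hinf))
    exact (pvCol_eq_self s.toList h none (by simp)).symm

-- B's single pass computes the collapsed form of the translated string
theorem pvFoldl_eq_col (l : List Char) :
    ∀ acc, l.foldl bStep acc = acc ++ pvCol acc.getLast? (l.map pvTr) := by
  induction l with
  | nil => intro acc; simp [pvCol]
  | cons x t ih =>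
    intro acc
    rw [List.map_cons, List.foldl_cons, ih]
    show bStep acc x ++ _ = acc ++ pvCol acc.getLast? (pvTr x :: t.map pvTr)
    by_cases hc : pvTr x = '_' ∧ acc ≠ [] ∧ acc.getLast? = some '_'
    · have hb : bStep acc x = acc := by
        simp only [bStep, pvTr] at hc ⊢
        rw [if_pos hc]
      rw [hb]
      have : pvCol acc.getLast? (pvTr x :: t.map pvTr) = pvCol acc.getLast? (t.map pvTr) := by
        simp [pvCol, hc.1, hc.2.2]
      rw [this]
    · have hb : bStep acc x = acc ++ [pvTr x] := by
        simp only [bStep, pvTr] at hc ⊢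
        rw [if_neg hc]
      rw [hb]
      have hcond : ¬ (pvTr x = '_' ∧ acc.getLast? = some '_') := by
        intro ⟨h1, h2⟩
        apply hc
        refine ⟨h1, ?_, h2⟩
        intro hnil; subst hnil; simp at h2
      have : pvCol acc.getLast? (pvTr x :: t.map pvTr)
          = pvTr x :: pvCol (some (pvTr x)) (t.map pvTr) := by
        simp only [pvCol, if_neg hcond]
      rw [this]
      simp [List.getLast?_append]

-- ===== VERDICT (by name: the statement is the Claim_ definition above) =====
theorem sanitize_name_py_spec : Claim_equal_sanitize_name_py := by
  intro name _
  unfold Spec_sanitize_name_py sanitize_name_py sanitize_name_py_alt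
  by_cases hn : name = ""
  · simp [hn]
  · simp only [if_neg hn]
    have key : (pyCollapseWhile (PySem.Str.replace (PySem.Str.replace (PySem.Str.replace
        (PySem.Str.replace (PySem.Str.replace name "." "_") " " "_") "/" "_") ":" "_")
        "\\" "_")).toList = name.toList.foldl bStep [] := by
      rw [pvWhile_eq_col, pvChainEqMap name, pvFoldl_eq_col name.toList []]
      simp
    apply String.toList_inj.mp
    simp only [PySem.Str.toList_stripChars, PySem.Str.toList_slice, String.toList_ofList]
    rw [key]
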